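-- pv_equiv track=rewrite | github.com/cschlick/qscore_standalone | qscore_cctbx.py | optimized_nd_to_1d_indices
-- ===== SOURCE A (Python) =====
-- def optimized_nd_to_1d_indices(i, shape):
--     # For fixed input of (None, i, None), we directly compute based on given structure
--     result_indices = []
--
--     # Pre-compute for 1st dimension which is always a slice
--     start1, stop1 = 0, shape[0]
--
--     # Pre-compute for 3rd dimension which is always a slice
--     start3, stop3 = 0, shape[2]
--     stride3 = 1
--
--     # Directly compute for 2nd dimension which is variable
--     stride2 = shape[2]
--     index2 = i * stride2 * shape[0]
--
--     for val1 in range(start1, stop1):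
--         for val3 in range(start3, stop3):
--             result_indices.append(val1 * stride2 + index2 + val3 * stride3)
--
--     return result_indices
-- ===== SOURCE B (Python) =====
-- def optimized_nd_to_1d_indices(i, shape):
--     # The enumerated indices are the consecutive integers starting at base,
--     # one per (val1, val3) pair; empty when either sliced dimension is empty.
--     if shape[0] <= 0 or shape[2] <= 0:
--         return []
--     base = i * shape[0] * shape[2]
--     return list(range(base, base + shape[0] * shape[2]))
-- ===== Notes on version B (the rewrite author's own statement) =====
-- stated objective: simpler
-- what changed: Replaces the nested double loop with a single closed-form contiguous range [base, base + shape[0]*shape[2]) since val1*shape[2]+val3 enumerates consecutive offsets.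
import Mathlib
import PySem

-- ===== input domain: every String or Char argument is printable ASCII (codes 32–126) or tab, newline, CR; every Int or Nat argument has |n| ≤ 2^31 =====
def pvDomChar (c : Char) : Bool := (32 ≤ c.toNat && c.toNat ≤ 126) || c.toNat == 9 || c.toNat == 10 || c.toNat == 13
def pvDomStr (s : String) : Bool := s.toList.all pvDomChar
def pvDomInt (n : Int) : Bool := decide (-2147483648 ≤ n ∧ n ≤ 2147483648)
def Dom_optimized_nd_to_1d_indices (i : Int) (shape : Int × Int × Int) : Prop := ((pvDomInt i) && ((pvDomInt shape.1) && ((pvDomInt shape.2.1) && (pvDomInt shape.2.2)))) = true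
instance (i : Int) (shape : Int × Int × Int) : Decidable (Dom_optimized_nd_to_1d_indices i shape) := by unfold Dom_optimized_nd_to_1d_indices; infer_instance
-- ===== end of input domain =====

-- B replaces A's nested append loops with one closed-form contiguous range; objective: simpler.


-- ===== PORT A =====
def optimized_nd_to_1d_indices (i : Int) (shape : Int × Int × Int) : List Int :=
  let start1 : Int := 0
  let stop1 : Int := shape.1
  let start3 : Int := 0
  let stop3 : Int := shape.2.2
  let stride3 : Int := 1
  let stride2 : Int := shape.2.2
  let index2 : Int := i * stride2 * shape.1
  (PySem.List.pyRange start1 stop1 1).foldl (fun acc val1 =>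
    (PySem.List.pyRange start3 stop3 1).foldl (fun acc2 val3 =>
      acc2 ++ [val1 * stride2 + index2 + val3 * stride3]) acc) []

-- ===== PORT B =====
def optimized_nd_to_1d_indices_alt (i : Int) (shape : Int × Int × Int) : List Int :=
  if shape.1 ≤ 0 ∨ shape.2.2 ≤ 0 then []
  else
    let base : Int := i * shape.1 * shape.2.2
    PySem.List.pyRange base (base + shape.1 * shape.2.2) 1

-- ===== PRECONDITION & SPEC =====
def Spec_optimized_nd_to_1d_indices (i : Int) (shape : Int × Int × Int) (out : List Int) : Prop := out = optimized_nd_to_1d_indices_alt i shape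
instance (i : Int) (shape : Int × Int × Int) (out : List Int) : Decidable (Spec_optimized_nd_to_1d_indices i shape out) := by unfold Spec_optimized_nd_to_1d_indices; infer_instance

-- ===== CLAIM (what is proved, stated in full; the proofs are below) =====
def Claim_equal_optimized_nd_to_1d_indices : Prop := ∀ (i : Int) (shape : Int × Int × Int), Dom_optimized_nd_to_1d_indices i shape → Spec_optimized_nd_to_1d_indices i shape (optimized_nd_to_1d_indices i shape)

-- ===== LEMMAS AND PROOFS =====

-- one inner pass appends the consecutive block [c, c+s2)
lemma inner_block (s2 c : Int) (acc : List Int) :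
    (PySem.List.pyRange 0 s2 1).foldl (fun acc2 v3 => acc2 ++ [c + v3 * 1]) acc
      = acc ++ PySem.List.pyRange c (c + s2) 1 := by
  rw [PySem.List.foldl_append_singleton_eq_map]
  simp [PySem.List.pyRange_one, List.map_map, Function.comp_def]

-- the outer loop concatenates n consecutive blocks of width s2 into one range
lemma outer_blocks (s2 index2 : Int) (hs2 : 0 < s2) :
    ∀ (n : Nat) (idx2 : Int), idx2 = index2 →
      (PySem.List.pyRange 0 (n : Int) 1).foldl (fun acc val1 =>
        (PySem.List.pyRange 0 s2 1).foldl (fun acc2 val3 =>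
          acc2 ++ [val1 * s2 + idx2 + val3 * 1]) acc) []
      = PySem.List.pyRange index2 (index2 + n * s2) 1 := by
  intro n
  induction n with
  | zero =>
    intro idx2 h
    simp
  | succ m ih =>
    intro idx2 h
    have hsplit : PySem.List.pyRange 0 ((m + 1 : Nat) : Int) 1
        = PySem.List.pyRange 0 (m : Int) 1 ++ [(m : Int)] := by
      have := PySem.List.pyRange_one_succ_right (a := 0) (b := (m : Int)) (by positivity)
      push_cast
      push_cast at this
      exact this
    rw [hsplit, List.foldl_append]
    rw [ih idx2 h]
    simp only [List.foldl_cons, List.foldl_nil]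
    rw [inner_block s2 ((m : Int) * s2 + idx2)]
    rw [h]
    have h1 : index2 ≤ index2 + (m : Int) * s2 := by nlinarith [Int.natCast_nonneg m]
    have h2 : index2 + (m : Int) * s2 ≤ index2 + ((m : Nat) + 1 : Int) * s2 := by nlinarith
    rw [PySem.List.pyRange_one_append index2 (index2 + (m : Int) * s2)
        (index2 + ((m + 1 : Nat) : Int) * s2) h1 (by push_cast; nlinarith)]
    congr 2 <;> push_cast <;> ring

-- ===== VERDICT (by name: the statement is the Claim_ definition above) =====
theorem optimized_nd_to_1d_indices_spec : Claim_equal_optimized_nd_to_1d_indices := by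
  intro i shape _
  unfold Spec_optimized_nd_to_1d_indices optimized_nd_to_1d_indices optimized_nd_to_1d_indices_alt
  obtain ⟨s0, s1, s2⟩ := shape
  simp only
  by_cases h0 : s0 ≤ 0
  · rw [PySem.List.pyRange_one_eq_nil h0]
    simp [h0]
  · by_cases h2 : s2 ≤ 0
    · rw [PySem.List.pyRange_one_eq_nil (a := 0) (b := s2) h2]
      simp [h2]
    · push Not at h0 h2
      have hn : s0 = ((s0.toNat : Nat) : Int) := by omega
      rw [if_neg (by omega)]
      rw [hn]
      rw [outer_blocks s2 (i * s2 * ((s0.toNat : Nat) : Int)) h2 s0.toNat _ rfl]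
      congr 1 <;> ring
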